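-- pv_equiv track=rewrite | github.com/jon-xo/python-practice | loops/loop_challenge.py | over_nine_thousand
-- ===== SOURCE A (Python) =====
-- def over_nine_thousand(lst):
--     tally = 0
--     if len(lst) == 0:
--         return tally
--     else:
--         for num in lst:
--             if(tally <= 9000):
--                 tally += num
--         return tally
-- ===== SOURCE B (Python) =====
-- from itertools import accumulate
--
-- def over_nine_thousand(lst):
--     if not lst:
--         return 0
--     sums = list(accumulate(lst))
--     return next((p for p in sums if p > 9000), sums[-1])
-- ===== Notes on version B (the rewrite author's own statement) =====
-- stated objective: idiomatic
-- what changed: Replaces the accumulate-while-under-9000 loop (which keeps iterating uselessly after the cap) with a two-phase table-then-search: build the prefix-sum list with itertools.accumulate and return the first prefix sum exceeding 9000, else the total.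
import Mathlib
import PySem

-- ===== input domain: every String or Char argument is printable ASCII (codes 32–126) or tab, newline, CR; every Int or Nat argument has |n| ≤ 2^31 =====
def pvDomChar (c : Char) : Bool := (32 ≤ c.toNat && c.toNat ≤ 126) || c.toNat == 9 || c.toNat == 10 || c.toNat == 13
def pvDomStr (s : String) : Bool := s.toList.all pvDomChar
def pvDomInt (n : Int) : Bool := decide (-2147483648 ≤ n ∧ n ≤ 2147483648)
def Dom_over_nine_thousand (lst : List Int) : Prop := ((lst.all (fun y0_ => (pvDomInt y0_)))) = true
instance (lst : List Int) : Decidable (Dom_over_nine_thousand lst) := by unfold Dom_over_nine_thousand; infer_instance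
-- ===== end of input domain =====

-- B replaces A's skip-after-cap single loop by a prefix-sum table plus a first->9000 search (idiomatic two-phase form).


-- ===== PORT A =====
def over_nine_thousand (lst : List Int) : Int :=
  if lst.length == 0 then 0
  else lst.foldl (fun tally num => if tally ≤ 9000 then tally + num else tally) 0

-- ===== PORT B =====
-- itertools.accumulate: running prefix sums starting from t
def pvAccum (t : Int) : List Int → List Int
  | [] => []
  | x :: xs => (t + x) :: pvAccum (t + x) xs

def over_nine_thousand_alt (lst : List Int) : Int :=
  match lst with
  | [] => 0
  | _ =>
    let sums := pvAccum 0 lst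
    ((sums.find? (fun p => decide (9000 < p))).getD (sums.getLastD 0))

-- ===== PRECONDITION & SPEC =====
def Spec_over_nine_thousand (lst : List Int) (out : Int) : Prop := out = over_nine_thousand_alt lst
instance (lst : List Int) (out : Int) : Decidable (Spec_over_nine_thousand lst out) := by unfold Spec_over_nine_thousand; infer_instance

-- ===== CLAIM (what is proved, stated in full; the proofs are below) =====
def Claim_equal_over_nine_thousand : Prop := ∀ (lst : List Int), Dom_over_nine_thousand lst → Spec_over_nine_thousand lst (over_nine_thousand lst)

-- ===== LEMMAS AND PROOFS =====
theorem pvFold_main (xs : List Int) : ∀ t : Int,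
    xs.foldl (fun tally num => if tally ≤ 9000 then tally + num else tally) t =
      if t ≤ 9000 then
        ((pvAccum t xs).find? (fun p => decide (9000 < p))).getD ((pvAccum t xs).getLastD t)
      else t := by
  induction xs with
  | nil => intro t; simp [pvAccum]
  | cons x xs ih =>
    intro t
    by_cases ht : t ≤ 9000
    · simp only [List.foldl, if_pos ht, pvAccum, List.find?]
      rw [ih (t + x)]
      by_cases hx : 9000 < t + x
      · have : ¬ (t + x ≤ 9000) := by omega
        simp [hx, this]
      · have h1 : t + x ≤ 9000 := by omega
        cases h : pvAccum (t + x) xs with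
        | nil => simp [hx, h1]
        | cons y ys => simp [hx, h1, List.getLast?_cons]
    · simp only [List.foldl, if_neg ht]
      rw [ih t]
      simp [ht]

theorem over_nine_thousand_spec : Claim_equal_over_nine_thousand := by
  intro lst _
  unfold Spec_over_nine_thousand over_nine_thousand over_nine_thousand_alt
  cases lst with
  | nil => simp
  | cons x xs =>
    simp only [List.length_cons]
    rw [pvFold_main]
    simp
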